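-- pv_equiv track=rewrite | github.com/Eirik-MS/NTNU_Code | Py_ITGK/Oving8/test.py | unique_letters
-- ===== SOURCE A (Python) =====
-- def unique_letters(lst):
--     dict_capitals = {}
--     for elmt in lst:
--         if not any(elmt[1].lower().count(letter) > 1 for letter in elmt[1].lower()):
--             if len(elmt[1]) in dict_capitals:
--                 dict_capitals[len(elmt[1])].append(elmt[1])
--             else:
--                 dict_capitals[len(elmt[1])] = [elmt[1]]
--     return dict_capitals
-- ===== SOURCE B (Python) =====
-- def unique_letters(lst):
--     words = [e[1] for e in lst if len(set(e[1].lower())) == len(e[1].lower())]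
--     return {len(w): [v for v in words if len(v) == len(w)] for w in words}
-- ===== Notes on version B (the rewrite author's own statement) =====
-- stated objective: idiomatic
-- what changed: A probes a dict with membership tests and appends word by word; B first builds the flat list of qualifying words (distinct letters after lower()) with a filtering comprehension using len(set(...)) instead of per-letter count() scans, then builds the whole dict in one comprehension that maps each occurring length to the sublist of words of that length.
import Mathlib
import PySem

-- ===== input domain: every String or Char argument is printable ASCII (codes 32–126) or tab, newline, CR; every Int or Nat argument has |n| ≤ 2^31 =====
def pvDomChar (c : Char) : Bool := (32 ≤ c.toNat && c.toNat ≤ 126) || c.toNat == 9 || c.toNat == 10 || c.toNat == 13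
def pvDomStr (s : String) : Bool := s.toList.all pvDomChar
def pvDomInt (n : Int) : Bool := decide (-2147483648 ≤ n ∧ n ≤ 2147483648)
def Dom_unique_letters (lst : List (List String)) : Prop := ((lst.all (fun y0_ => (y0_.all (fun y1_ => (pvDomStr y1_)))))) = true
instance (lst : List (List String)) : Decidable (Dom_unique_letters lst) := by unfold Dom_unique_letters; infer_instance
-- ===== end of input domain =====

-- B replaces A's incremental dict-probing loop (per-letter count() scans, membership test,
-- append-or-create) by a filtering comprehension with a set()-based uniqueness test followed by
-- one dict comprehension grouping the word list by length (objective: more idiomatic).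

-- ===== PORT A =====
-- 'not any(elmt[1].lower().count(letter) > 1 for letter in elmt[1].lower())'
def pvQualA (w : String) : Bool :=
  !((PySem.Chars.lower w.toList).any (fun letter =>
      decide (1 < PySem.Chars.count (PySem.Chars.lower w.toList) [letter])))

-- one iteration of A's loop body; pyGet? is none exactly where Python's elmt[1] raises IndexError
def pvStepA (d : PySem.Dict Int (List String)) (e : List String) :
    Option (PySem.Dict Int (List String)) :=
  (PySem.List.pyGet? e 1).map (fun w =>
    if pvQualA w then
      if d.contains (PySem.Str.len w) then
        d.insert (PySem.Str.len w) (d.getD (PySem.Str.len w) [] ++ [w])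
      else
        d.insert (PySem.Str.len w) [w]
    else d)

def unique_letters (lst : List (List String)) : List (Int × List String) :=
  (((lst.foldl (fun acc e => acc.bind (fun d => pvStepA d e))
      (some (PySem.Dict.empty : PySem.Dict Int (List String)))).map PySem.Dict.items).getD [])

-- ===== PORT B =====
-- 'len(set(e[1].lower())) == len(e[1].lower())'
def pvQualB (w : String) : Bool :=
  (PySem.Set.ofList (PySem.Chars.lower w.toList)).length == (PySem.Chars.lower w.toList).length

def unique_letters_alt (lst : List (List String)) : List (Int × List String) :=
  let words := lst.filterMap (fun e =>
    (PySem.List.pyGet? e 1).bind (fun w => if pvQualB w then some w else none))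
  (words.foldl (fun d w =>
      d.insert (PySem.Str.len w) (words.filter (fun v => PySem.Str.len v == PySem.Str.len w)))
    (PySem.Dict.empty : PySem.Dict Int (List String))).items

-- ===== PRECONDITION & SPEC =====
-- Pre_ excludes exactly the inputs where A raises IndexError: some inner list has no index 1.
def Pre_unique_letters (lst : List (List String)) : Prop := ∀ e ∈ lst, 2 ≤ e.length
instance (lst : List (List String)) : Decidable (Pre_unique_letters lst) := by
  unfold Pre_unique_letters; infer_instance

def pvWitness_unique_letters : List (List String) :=
  [["x", "ab"], ["y", "cab"], ["z", "cd"], ["w", "aa"]]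

def Spec_unique_letters (lst : List (List String)) (out : List (Int × List String)) : Prop :=
  out = unique_letters_alt lst
instance (lst : List (List String)) (out : List (Int × List String)) :
    Decidable (Spec_unique_letters lst out) := by unfold Spec_unique_letters; infer_instance

-- ===== CLAIM (what is proved, stated in full; the proofs are below) =====
def Claim_equal_unique_letters : Prop :=
  ∀ (lst : List (List String)), Dom_unique_letters lst → Pre_unique_letters lst →
    Spec_unique_letters lst (unique_letters lst)

-- ===== LEMMAS AND PROOFS =====

-- proof-only helper: the word A and B extract from a row (kept opaque to simp)
def pvW (e : List String) : String := e.getD 1 ""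

-- s.count(c) for a single character c counts occurrences of the character
theorem pv_count_go_single (c : Char) (l : List Char) :
    ∀ (fuel acc : Nat), l.length ≤ fuel →
      PySem.Chars.count.go [c] fuel l acc = acc + l.count c := by
  induction l with
  | nil => intro fuel acc _; cases fuel <;> simp [PySem.Chars.count.go]
  | cons h t ih =>
    intro fuel acc hf
    match fuel with
    | fuel + 1 =>
      have hstep : PySem.Chars.count.go [c] (fuel+1) (h :: t) acc
          = if c == h then PySem.Chars.count.go [c] fuel t (acc+1)
            else PySem.Chars.count.go [c] fuel t acc := by
        simp only [PySem.Chars.count.go]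
        simp [List.isPrefixOf]
      have ht : t.length ≤ fuel := by simpa using hf
      by_cases hc : c = h
      · have hbeq : (c == h) = true := by simp [hc]
        rw [hstep, if_pos hbeq, ih fuel (acc+1) ht, hc, List.count_cons_self]
        omega
      · have hbeq : ¬((c == h) = true) := by simp [hc]
        rw [hstep, if_neg hbeq, ih fuel acc ht, List.count_cons]
        have hhc : (h == c) = false := by simp [Ne.symm hc]
        simp [hhc]

theorem pv_count_single (c : Char) (l : List Char) :
    PySem.Chars.count l [c] = l.count c := by
  simp only [PySem.Chars.count]
  simp [pv_count_go_single c l l.length 0 le_rfl]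

theorem pv_card_iff (l : List Char) : l.toFinset.card = l.length ↔ l.Nodup := by
  rw [List.card_toFinset]
  constructor
  · intro h
    rw [← List.dedup_eq_self]
    exact (List.dedup_sublist l).eq_of_length h
  · intro h
    rw [List.dedup_eq_self.mpr h]

-- both uniqueness tests decide Nodup of the lowered characters
theorem pv_qual_eq (w : String) : pvQualB w = pvQualA w := by
  unfold pvQualA pvQualB
  set l := PySem.Chars.lower w.toList with hl
  have hfin : (PySem.Set.ofList l).toFinset = l.toFinset := by
    ext x; simp [PySem.Set.mem_ofList]
  have hcard : (PySem.Set.ofList l).length = l.toFinset.card := by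
    rw [← hfin, (pv_card_iff (PySem.Set.ofList l)).mpr (PySem.Set.nodup_ofList l)]
  by_cases hn : l.Nodup
  · have h1 : (PySem.Set.ofList l).length = l.length := by
      rw [hcard, (pv_card_iff l).mpr hn]
    have h2 : l.any (fun letter => decide (1 < PySem.Chars.count l [letter])) = false := by
      simp only [List.any_eq_false]
      intro a _
      have := List.nodup_iff_count_le_one.mp hn a
      simp [pv_count_single]
      omega
    simp [h1, h2]
  · have h1 : (PySem.Set.ofList l).length ≠ l.length := by
      rw [hcard]
      intro hEq
      exact hn ((pv_card_iff l).mp hEq)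
    obtain ⟨a, ha⟩ : ∃ a, 1 < l.count a := by
      by_contra hno
      exact hn (List.nodup_iff_count_le_one.mpr (fun a => by
        by_contra hgt
        exact hno ⟨a, by omega⟩))
    have hmem : a ∈ l := List.count_pos_iff.mp (by omega)
    have h2 : l.any (fun letter => decide (1 < PySem.Chars.count l [letter])) = true := by
      simp only [List.any_eq_true]
      exact ⟨a, hmem, by simp [pv_count_single, ha]⟩
    simp [h1, h2]

theorem pv_pyGet1 (e : List String) (h : 2 ≤ e.length) :
    PySem.List.pyGet? e 1 = some (pvW e) := by
  match e, h with
  | a :: b :: t, _ => simp [PySem.List.pyGet?, PySem.List.pyIdx?, pvW]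

-- A's two branches are one dict 'modify'
theorem pv_branch_eq_modify (d : PySem.Dict Int (List String)) (k : Int) (w : String) :
    (if d.contains k then d.insert k (d.getD k [] ++ [w]) else d.insert k [w])
      = d.modify k [] (fun x => x ++ [w]) := by
  by_cases hc : d.contains k
  · simp [hc, PySem.Dict.modify]
  · have hc' : d.contains k = false := by simpa using hc
    simp [hc', PySem.Dict.modify, PySem.Dict.getD_of_not_contains d [] hc']

-- A's Option-threaded fold returns 'some' of the plain fold over the extracted words
theorem pv_foldA (lst : List (List String)) :
    ∀ (d : PySem.Dict Int (List String)), Pre_unique_letters lst →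
      lst.foldl (fun acc e => acc.bind (fun d => pvStepA d e)) (some d)
        = some ((lst.map pvW).foldl
            (fun d w => if pvQualA w then d.modify (PySem.Str.len w) [] (fun x => x ++ [w]) else d)
            d) := by
  induction lst with
  | nil => intro d _; simp
  | cons e t ih =>
    intro d hpre
    have he : 2 ≤ e.length := hpre e (by simp)
    have ht : Pre_unique_letters t := fun x hx => hpre x (by simp [hx])
    rw [List.foldl_cons, List.map_cons, List.foldl_cons]
    have hstep : (some d).bind (fun d => pvStepA d e)
        = some (if pvQualA (pvW e) then
            PySem.Dict.modify d (PySem.Str.len (pvW e)) [] (fun x => x ++ [pvW e]) else d) := by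
      simp only [Option.bind_some, pvStepA, pv_pyGet1 e he, Option.map_some, pv_branch_eq_modify]
    rw [hstep]
    exact ih _ ht

-- B's comprehension produces the same word list
theorem pv_words (lst : List (List String)) (hpre : Pre_unique_letters lst) :
    lst.filterMap (fun e =>
        (PySem.List.pyGet? e 1).bind (fun w => if pvQualB w then some w else none))
      = (lst.map pvW).filter pvQualA := by
  induction lst with
  | nil => simp
  | cons e t ih =>
    have he : 2 ≤ e.length := hpre e (by simp)
    have ht : Pre_unique_letters t := fun x hx => hpre x (by simp [hx])
    rw [List.filterMap_cons, pv_pyGet1 e he, List.map_cons, List.filter_cons]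
    by_cases hq : pvQualA (pvW e)
    · have hqB : pvQualB (pvW e) = true := by rw [pv_qual_eq]; exact hq
      simp only [Option.bind_some, hqB, ite_true, hq, ih ht]
    · have hqB : pvQualB (pvW e) = false := by rw [pv_qual_eq]; simpa using hq
      simp only [Option.bind_some, hqB, Bool.false_eq_true, ite_false, hq, ih ht]

-- value lookup in B's fold: every insert at a key writes that key's whole group
theorem pv_getD_B (ws : List String) (l : List String) (c : Int) :
    ∀ (d : PySem.Dict Int (List String)),
      (l.foldl (fun d w =>
          d.insert (PySem.Str.len w) (ws.filter (fun v => PySem.Str.len v == PySem.Str.len w))) d).getD c []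
        = if c ∈ l.map PySem.Str.len then ws.filter (fun v => PySem.Str.len v == c)
          else d.getD c [] := by
  induction l with
  | nil => intro d; simp
  | cons h t ih =>
    intro d
    rw [List.foldl_cons, ih, PySem.Dict.getD_insert]
    by_cases hc : c = PySem.Str.len h
    · subst hc
      rw [if_pos rfl]
      simp only [List.map_cons, List.mem_cons]
      by_cases hm : PySem.Str.len h ∈ t.map PySem.Str.len
      · rw [if_pos hm, if_pos (by simp)]
      · rw [if_neg hm, if_pos (by simp)]
    · rw [if_neg hc]
      simp only [List.map_cons, List.mem_cons]
      by_cases hm : c ∈ t.map PySem.Str.len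
      · rw [if_pos hm, if_pos (Or.inr hm)]
      · rw [if_neg hm, if_neg (by tauto)]

-- ===== VERDICT (by name: the statement is the Claim_ definition above) =====
theorem unique_letters_spec : Claim_equal_unique_letters := by
  intro lst _ hpre
  unfold Spec_unique_letters unique_letters unique_letters_alt
  rw [pv_foldA lst PySem.Dict.empty hpre, pv_words lst hpre]
  simp only [Option.map_some, Option.getD_some]
  rw [PySem.List.foldl_if_eq_foldl_filter pvQualA
        (fun d w => PySem.Dict.modify d (PySem.Str.len w) [] (fun x => x ++ [w]))]
  set ws := ((lst.map pvW).filter pvQualA) with hws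
  set dA := ws.foldl (fun d w => PySem.Dict.modify d (PySem.Str.len w) [] (fun x => x ++ [w]))
      (PySem.Dict.empty : PySem.Dict Int (List String)) with hdA
  set dB := ws.foldl (fun d w =>
      d.insert (PySem.Str.len w) (ws.filter (fun v => PySem.Str.len v == PySem.Str.len w)))
      (PySem.Dict.empty : PySem.Dict Int (List String)) with hdB
  have hkA : dA.keys = PySem.Set.update PySem.Dict.empty.keys (ws.map PySem.Str.len) :=
    PySem.Dict.keys_foldl_modify_key ws PySem.Str.len [] (fun _ w => fun x => x ++ [w]) _
  have hkB : dB.keys = PySem.Set.update PySem.Dict.empty.keys (ws.map PySem.Str.len) :=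
    PySem.Dict.keys_foldl_insert_key ws PySem.Str.len
      (fun _ w => ws.filter (fun v => PySem.Str.len v == PySem.Str.len w)) _
  have hnA : dA.keys.Nodup :=
    PySem.Dict.nodup_keys_foldl_modify_key ws PySem.Str.len [] _ _ PySem.Dict.nodup_keys_empty
  have hnB : dB.keys.Nodup :=
    PySem.Dict.nodup_keys_foldl_insert_key ws PySem.Str.len _ _ PySem.Dict.nodup_keys_empty
  rw [PySem.Dict.items_eq_map_keys dA hnA [], PySem.Dict.items_eq_map_keys dB hnB [], hkA, hkB]
  apply List.map_congr_left
  intro c hc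
  show (c, dA.getD c []) = (c, dB.getD c [])
  have hupd : PySem.Set.update (PySem.Dict.empty : PySem.Dict Int (List String)).keys
      (ws.map PySem.Str.len) = PySem.Set.ofList (ws.map PySem.Str.len) := by
    rw [PySem.Dict.keys_empty]
    simp [PySem.Set.update, PySem.Set.ofList_eq_foldl]
  have hcmem : c ∈ ws.map PySem.Str.len :=
    (PySem.Set.mem_ofList _ c).mp (hupd ▸ hc)
  have hpair : (ws.map (fun w => (PySem.Str.len w, w))).foldl
      (fun (d : PySem.Dict Int (List String)) p => d.modify p.1 [] (fun x => x ++ [p.2]))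
      PySem.Dict.empty = dA := by
    rw [List.foldl_map]
  have hA : dA.getD c [] = ws.filter (fun v => PySem.Str.len v == c) := by
    rw [← hpair, PySem.Dict.getD_foldl_modify_append]
    simp [List.filter_map, Function.comp_def]
  have hB : dB.getD c [] = ws.filter (fun v => PySem.Str.len v == c) := by
    rw [hdB, pv_getD_B ws ws c PySem.Dict.empty, if_pos hcmem]
  rw [hA, hB]
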